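-- pv_equiv track=rewrite | github.com/AzatGIT116/Python.Seminar1.DZ3 | DZ3.py | f
-- ===== SOURCE A (Python) =====
-- def f(num):
--     fibo = []
--     n1 = n2 = 1
--     for i in range(num):
--         fibo.append(n1)
--         n1, n2 = n2, n1 + n2
--     n1, n2 = 0, 1
--     for i in range(num+1):
--         fibo.insert(0, n1)
--         n1, n2 = n2, n1 - n2
--     return fibo
-- ===== SOURCE B (Python) =====
-- def f(num):
--     # One forward Fibonacci pass, then the negative half via the
--     # negafibonacci identity F(-k) = (-1)**(k+1) * F(k).
--     fib = []
--     a, b = 0, 1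
--     for _ in range(num + 1):
--         fib.append(a)
--         a, b = b, a + b
--     left = [(-1) ** (k + 1) * fib[k] for k in range(num, 0, -1)]
--     return left + fib
-- ===== Notes on version B (the rewrite author's own statement) =====
-- stated objective: alternative
-- what changed: Replaces A's second loop (the backward subtraction recurrence with repeated list-front inserts) by one forward Fibonacci pass plus the closed-form negafibonacci sign identity F(-k) = sign(k)*F(k), with the sign alternating by parity of k, applied over the already-built positive list.
import Mathlib
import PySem

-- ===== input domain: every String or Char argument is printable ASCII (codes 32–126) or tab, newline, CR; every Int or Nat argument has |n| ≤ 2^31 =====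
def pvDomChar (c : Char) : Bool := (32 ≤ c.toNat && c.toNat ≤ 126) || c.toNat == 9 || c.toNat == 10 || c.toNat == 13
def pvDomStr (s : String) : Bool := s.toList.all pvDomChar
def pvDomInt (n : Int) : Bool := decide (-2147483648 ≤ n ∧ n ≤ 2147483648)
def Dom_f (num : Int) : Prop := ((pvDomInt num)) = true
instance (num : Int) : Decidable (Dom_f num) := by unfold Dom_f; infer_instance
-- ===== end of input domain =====

-- B replaces A's quadratic insert(0,...) backward-subtraction loop by a forward Fibonacci
-- pass plus the negafibonacci identity F(-k) = (-1)^(k+1)·F(k) (objective: alternative).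

-- ===== PORT A =====
def f (num : Int) : List Int :=
  -- fibo = []; n1 = n2 = 1; for i in range(num): fibo.append(n1); n1, n2 = n2, n1 + n2
  let s1 := (PySem.List.pyRange 0 num 1).foldl
      (fun (st : List Int × Int × Int) _ => (st.1 ++ [st.2.1], st.2.2, st.2.1 + st.2.2))
      ([], 1, 1)
  -- n1, n2 = 0, 1; for i in range(num+1): fibo.insert(0, n1); n1, n2 = n2, n1 - n2
  let s2 := (PySem.List.pyRange 0 (num + 1) 1).foldl
      (fun (st : List Int × Int × Int) _ =>
        (PySem.List.insert st.1 0 st.2.1, st.2.2, st.2.1 - st.2.2))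
      (s1.1, 0, 1)
  s2.1

-- ===== PORT B =====
def f_alt (num : Int) : List Int :=
  -- fib = []; a, b = 0, 1; for _ in range(num + 1): fib.append(a); a, b = b, a + b
  let fib := ((PySem.List.pyRange 0 (num + 1) 1).foldl
      (fun (st : List Int × Int × Int) _ => (st.1 ++ [st.2.1], st.2.2, st.2.1 + st.2.2))
      ([], 0, 1)).1
  -- left = [(-1) ** (k + 1) * fib[k] for k in range(num, 0, -1)]
  -- fib[k] ported total via pyGetD (k ∈ [1, num] is always in range here);
  -- (-1)**(k+1) via a Nat exponent (.toNat is exact: k ≥ 1 so k + 1 ≥ 2 ≥ 0).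
  let left := (PySem.List.pyRange num 0 (-1)).map
      (fun k => (-1 : Int) ^ (k + 1).toNat * PySem.List.pyGetD fib k 0)
  left ++ fib

-- ===== PRECONDITION & SPEC =====
def Spec_f (num : Int) (out : List Int) : Prop := out = f_alt num
instance (num : Int) (out : List Int) : Decidable (Spec_f num out) := by unfold Spec_f; infer_instance

-- ===== CLAIM (what is proved, stated in full; the proofs are below) =====
def Claim_equal_f : Prop := ∀ (num : Int), Dom_f num → Spec_f num (f num)

-- ===== LEMMAS AND PROOFS =====

-- Fibonacci over Nat (proof-side reference sequence).
def fibI : Nat → Int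
  | 0 => 0
  | 1 => 1
  | n + 2 => fibI n + fibI (n + 1)

-- A's first loop (append, start 1 1).
lemma loopA1 (n : Nat) :
    (PySem.List.pyRange 0 (n : Int) 1).foldl
      (fun (st : List Int × Int × Int) _ => (st.1 ++ [st.2.1], st.2.2, st.2.1 + st.2.2))
      ([], 1, 1)
    = ((List.range n).map (fun i => fibI (i + 1)), fibI (n + 1), fibI (n + 2)) := by
  induction n with
  | zero => simp [PySem.List.pyRange_one_eq_nil, fibI]
  | succ n ih =>
      have h : ((n : Int) + 1) = ((n + 1 : Nat) : Int) := by push_cast; ring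
      rw [← h, PySem.List.pyRange_one_succ_right (by positivity), List.foldl_append, ih]
      simp [List.range_succ, fibI]

-- B's forward loop (append, start 0 1).
lemma loopB1 (n : Nat) :
    (PySem.List.pyRange 0 (n : Int) 1).foldl
      (fun (st : List Int × Int × Int) _ => (st.1 ++ [st.2.1], st.2.2, st.2.1 + st.2.2))
      ([], 0, 1)
    = ((List.range n).map fibI, fibI n, fibI (n + 1)) := by
  induction n with
  | zero => simp [PySem.List.pyRange_one_eq_nil, fibI]
  | succ n ih =>
      have h : ((n : Int) + 1) = ((n + 1 : Nat) : Int) := by push_cast; ring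
      rw [← h, PySem.List.pyRange_one_succ_right (by positivity), List.foldl_append, ih]
      cases n with
      | zero => simp [List.range_succ, fibI]
      | succ m => simp [List.range_succ, fibI]

-- The signed value A's second loop prepends at step j: F(-j) = (-1)^(j+1)·F(j).
def negfib (j : Nat) : Int := (-1 : Int) ^ (j + 1) * fibI j

-- A's second loop (prepend, subtraction recurrence, start 0 1).
lemma loopA2 (n : Nat) (L : List Int) :
    (PySem.List.pyRange 0 (n : Int) 1).foldl
      (fun (st : List Int × Int × Int) _ =>
        (PySem.List.insert st.1 0 st.2.1, st.2.2, st.2.1 - st.2.2))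
      (L, 0, 1)
    = (((List.range n).map negfib).reverse ++ L,
       negfib n, (-1 : Int) ^ n * fibI (n + 1)) := by
  induction n with
  | zero => simp [PySem.List.pyRange_one_eq_nil, negfib, fibI]
  | succ n ih =>
      have h : ((n : Int) + 1) = ((n + 1 : Nat) : Int) := by push_cast; ring
      rw [← h, PySem.List.pyRange_one_succ_right (by positivity), List.foldl_append, ih]
      simp only [List.foldl_cons, List.foldl_nil, PySem.List.insert_zero, List.range_succ,
        List.map_append, List.reverse_append]
      refine Prod.ext ?_ (Prod.ext ?_ ?_)
      · simp [negfib]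
      · simp only [negfib, pow_succ, pow_succ]; ring
      · simp only [negfib, fibI, pow_succ]; ring

-- ===== VERDICT =====
theorem f_spec : Claim_equal_f := by
  intro num _
  unfold Spec_f f f_alt
  by_cases hpos : 0 ≤ num
  · obtain ⟨n, rfl⟩ := Int.eq_ofNat_of_zero_le hpos
    have h1 : ((n : Int) + 1) = ((n + 1 : Nat) : Int) := by push_cast; ring
    rw [h1, loopA1 n, loopB1 (n + 1)]
    simp only [loopA2]
    -- rewrite B's left comprehension
    have hleft : (PySem.List.pyRange (n : Int) 0 (-1)).map
        (fun k => (-1 : Int) ^ (k + 1).toNat *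
          PySem.List.pyGetD ((List.range (n + 1)).map fibI) k 0)
        = ((List.range n).map (fun i => negfib (i + 1))).reverse := by
      rw [PySem.List.pyRange_neg_one_eq_reverse, List.map_reverse]
      congr 1
      rw [PySem.List.pyRange_one]
      have hn : ((n : Int) + 1 - 1).toNat = n := by omega
      simp only [zero_add, List.map_map, hn]
      apply List.map_congr_left
      intro i hi
      simp only [List.mem_range] at hi
      have hcast : (1 : Int) + (i : Int) = ((i + 1 : Nat) : Int) := by push_cast; ring
      simp only [Function.comp, hcast, PySem.List.pyGetD_natCast]
      rw [PySem.List.getD_map_range fibI (n + 1) (i + 1) 0 (by omega)]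
      have : (((i + 1 : Nat) : Int) + 1).toNat = i + 2 := by omega
      rw [this]
      simp [negfib]
    rw [hleft]
    -- both sides: reversed negative half ++ [0] ++ positive half
    rw [List.range_succ_eq_map]
    simp only [List.map_cons, List.map_map, List.reverse_cons]
    have h0 : negfib 0 = fibI 0 := by simp [negfib, fibI]
    simp [Function.comp_def, h0, fibI, Nat.succ_eq_add_one]
  · -- num < 0: every range is empty, both sides are []
    have e1 : PySem.List.pyRange 0 num 1 = [] :=
      PySem.List.pyRange_one_eq_nil (by omega)
    have e2 : PySem.List.pyRange 0 (num + 1) 1 = [] :=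
      PySem.List.pyRange_one_eq_nil (by omega)
    have e3 : PySem.List.pyRange num 0 (-1) = [] :=
      PySem.List.pyRange_neg_one_eq_nil (by omega)
    simp [e1, e2, e3]
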